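-- pv_equiv track=rewrite | github.com/Peter-Luthier/programmer_calculator | src/calculator_view.py | format_binary_string
-- ===== SOURCE A (Python) =====
-- def format_binary_string(num, bit_length, max_bits_per_line):
--     binary_string = f"{num:0{bit_length}b}"
--     rev_bin_str = binary_string[::-1]
--     binary_lines = [rev_bin_str[i:i+max_bits_per_line] for i in range(0, len(rev_bin_str), max_bits_per_line)]
--     line_list = []
--     for line in binary_lines:
--         grouped_bits = ' '.join([line[i:i+4] for i in range(0, len(line), 4)])
--         line_list.insert(0, grouped_bits[::-1])
--     formatted_string =  '\n'.join(line_list)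
--
--     return formatted_string
-- ===== SOURCE B (Python) =====
-- def _group4(line):
--     r = len(line) % 4
--     parts = ([line[:r]] if r else []) + [line[i:i+4] for i in range(r, len(line), 4)]
--     return ' '.join(parts)
--
--
-- def format_binary_string(num, bit_length, max_bits_per_line):
--     s = f"{num:0{bit_length}b}"
--     r = len(s) % max_bits_per_line
--     lines = ([s[:r]] if r else []) + [s[i:i+max_bits_per_line] for i in range(r, len(s), max_bits_per_line)]
--     return '\n'.join(_group4(line) for line in lines)
-- ===== Notes on version B (the rewrite author's own statement) =====
-- stated objective: simpler
-- what changed: B drops A's reverse/chunk-left/re-reverse trick: it splits the binary string from the right into lines and 4-bit groups directly via the length-mod remainder, never reversing anything.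
-- outside the precondition, e.g. on format_binary_string(5, 8, -3): A returns '', B returns '000 0010'
import Mathlib
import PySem

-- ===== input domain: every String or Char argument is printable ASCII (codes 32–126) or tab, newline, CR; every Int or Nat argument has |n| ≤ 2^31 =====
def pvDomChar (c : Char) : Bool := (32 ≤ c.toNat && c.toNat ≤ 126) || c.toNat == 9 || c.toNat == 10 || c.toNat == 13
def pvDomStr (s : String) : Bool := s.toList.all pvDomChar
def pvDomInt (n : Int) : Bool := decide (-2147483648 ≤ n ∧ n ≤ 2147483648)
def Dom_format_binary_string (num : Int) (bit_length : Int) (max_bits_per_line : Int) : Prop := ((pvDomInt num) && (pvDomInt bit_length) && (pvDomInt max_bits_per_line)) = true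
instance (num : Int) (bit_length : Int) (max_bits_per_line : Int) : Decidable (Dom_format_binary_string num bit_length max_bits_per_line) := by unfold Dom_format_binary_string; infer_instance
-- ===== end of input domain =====

-- B replaces A's reverse / chunk-from-the-left / re-reverse trick by direct right-anchored
-- splitting (length-mod remainder first, then fixed-size chunks); objective: simpler.

-- ===== PORT A =====
-- shared helper: exact port of the f-string f"{num:0{bit_length}b}" (both Pythons contain this
-- literal expression) for bit_length ≥ 0 (Pre_); '0' zero-padding in Python is sign-aware.
def pyBinChars (num : Int) (bit_length : Int) : List Char :=
  if num < 0 then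
    let d := Nat.toDigits 2 (-num).toNat
    '-' :: (List.replicate (bit_length.toNat - 1 - d.length) '0' ++ d)
  else
    let d := Nat.toDigits 2 num.toNat
    List.replicate (bit_length.toNat - d.length) '0' ++ d

def format_binary_string (num : Int) (bit_length : Int) (max_bits_per_line : Int) : String :=
  let binary_string := pyBinChars num bit_length
  -- binary_string[::-1] is List.reverse (PySem.List.slice?_none_none_neg_one)
  let rev_bin_str := binary_string.reverse
  let binary_lines := (PySem.List.pyRange 0 (rev_bin_str.length : Int) max_bits_per_line).map
    (fun i => PySem.List.slice rev_bin_str (some i) (some (i + max_bits_per_line)))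
  let line_list := binary_lines.foldl (fun acc line =>
    let grouped_bits := PySem.Chars.join [' ']
      ((PySem.List.pyRange 0 (line.length : Int) 4).map
        (fun i => PySem.List.slice line (some i) (some (i + 4))))
    grouped_bits.reverse :: acc) []   -- line_list.insert(0, x) prepends
  String.mk (PySem.Chars.join ['\n'] line_list)

-- ===== PORT B =====
def pvGroup4 (line : List Char) : List Char :=
  let r := PySem.Int.mod (line.length : Int) 4
  let parts := (if r ≠ 0 then [PySem.List.slice line none (some r)] else []) ++
    (PySem.List.pyRange r (line.length : Int) 4).map
      (fun i => PySem.List.slice line (some i) (some (i + 4)))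
  PySem.Chars.join [' '] parts

def format_binary_string_alt (num : Int) (bit_length : Int) (max_bits_per_line : Int) : String :=
  let s := pyBinChars num bit_length
  let r := PySem.Int.mod (s.length : Int) max_bits_per_line
  let lines := (if r ≠ 0 then [PySem.List.slice s none (some r)] else []) ++
    (PySem.List.pyRange r (s.length : Int) max_bits_per_line).map
      (fun i => PySem.List.slice s (some i) (some (i + max_bits_per_line)))
  String.mk (PySem.Chars.join ['\n'] (lines.map pvGroup4))

-- ===== PRECONDITION & SPEC =====
-- Pre_ excludes bit_length < 0 (A raises ValueError: invalid format spec) and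
-- max_bits_per_line = 0 (A raises ValueError from range step 0); it also excludes
-- max_bits_per_line < 0, where A returns '' only as an accident of range() with a
-- negative step and B's remainder arithmetic is meaningless.
def Pre_format_binary_string (num : Int) (bit_length : Int) (max_bits_per_line : Int) : Prop :=
  0 ≤ bit_length ∧ 1 ≤ max_bits_per_line
instance (num : Int) (bit_length : Int) (max_bits_per_line : Int) : Decidable (Pre_format_binary_string num bit_length max_bits_per_line) := by unfold Pre_format_binary_string; infer_instance

def pvWitness_format_binary_string : Int × Int × Int := (12345, 16, 5)

def Spec_format_binary_string (num : Int) (bit_length : Int) (max_bits_per_line : Int) (out : String) : Prop := out = format_binary_string_alt num bit_length max_bits_per_line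
instance (num : Int) (bit_length : Int) (max_bits_per_line : Int) (out : String) : Decidable (Spec_format_binary_string num bit_length max_bits_per_line out) := by unfold Spec_format_binary_string; infer_instance

-- ===== CLAIM (what is proved, stated in full; the proofs are below) =====
def Claim_equal_format_binary_string : Prop := ∀ (num : Int) (bit_length : Int) (max_bits_per_line : Int), Dom_format_binary_string num bit_length max_bits_per_line → Pre_format_binary_string num bit_length max_bits_per_line → Spec_format_binary_string num bit_length max_bits_per_line (format_binary_string num bit_length max_bits_per_line)

-- ===== LEMMAS AND PROOFS =====

-- left-anchored chunking into pieces of size m (the canonical form both ports reduce to)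
def pvChunkL {α : Type} (m : Nat) (l : List α) : List (List α) :=
  if h : l = [] ∨ m = 0 then [] else l.take m :: pvChunkL m (l.drop m)
termination_by l.length
decreasing_by
  simp only [not_or] at h
  have : 0 < m := Nat.pos_of_ne_zero h.2
  have : l.length ≠ 0 := by simpa using h.1
  simp [List.length_drop]; omega

-- right-anchored form: leading remainder (if any) then full chunks
def pvRemForm {α : Type} (m : Nat) (l : List α) : List (List α) :=
  (if l.length % m ≠ 0 then [l.take (l.length % m)] else []) ++ pvChunkL m (l.drop (l.length % m))

theorem pvChunkL_nil {α : Type} (m : Nat) : pvChunkL m ([] : List α) = [] := by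
  rw [pvChunkL]; simp

theorem pvChunkL_eq_cons {α : Type} (m : Nat) (l : List α) (hm : m ≠ 0) (hl : l ≠ []) :
    pvChunkL m l = l.take m :: pvChunkL m (l.drop m) := by
  rw [pvChunkL]; simp [hm, hl]

theorem pvChunkL_singleton {α : Type} (m : Nat) (l : List α) (hm : 0 < m)
    (hl : l ≠ []) (hlen : l.length ≤ m) : pvChunkL m l = [l] := by
  rw [pvChunkL_eq_cons m l (by omega) hl]
  rw [List.take_of_length_le hlen, List.drop_eq_nil_of_le hlen, pvChunkL_nil]

theorem pvChunkL_append {α : Type} (m : Nat) (hm : 0 < m) (u v : List α) (hu : m ∣ u.length) :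
    pvChunkL m (u ++ v) = pvChunkL m u ++ pvChunkL m v := by
  obtain ⟨q, hq⟩ := hu
  induction q generalizing u with
  | zero =>
    have : u = [] := List.eq_nil_of_length_eq_zero (by omega)
    simp [this, pvChunkL_nil]
  | succ k ih =>
    have hmu : m ≤ u.length := by rw [hq, Nat.mul_succ]; omega
    have hne : u ≠ [] := by intro h; subst h; simp at hq; omega
    rw [pvChunkL_eq_cons m (u ++ v) (by omega) (by simp [hne]),
        pvChunkL_eq_cons m u (by omega) hne,
        List.take_append_of_le_length hmu, List.drop_append_of_le_length hmu]
    rw [ih (u.drop m) (by rw [List.length_drop, hq, Nat.mul_succ]; omega)]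
    simp

-- peeling the last full chunk off the right-anchored form
theorem pvRemForm_peel {α : Type} (m : Nat) (hm : 0 < m) (s : List α) (hlt : m < s.length) :
    pvRemForm m s = pvRemForm m (s.take (s.length - m)) ++ [s.drop (s.length - m)] := by
  set r := s.length % m with hr
  have hrm : r < m := Nat.mod_lt _ hm
  have h2 : (s.length - m) % m = r := by
    rw [hr]
    conv_rhs => rw [show s.length = (s.length - m) + m by omega]
    rw [Nat.add_mod_right]
  have hrle : r ≤ s.length - m := by
    have := Nat.mod_le (s.length - m) m
    omega
  have hlenA : (s.take (s.length - m)).length = s.length - m := by simp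
  have hmodA : (s.take (s.length - m)).length % m = r := by rw [hlenA, h2]
  -- the tail of full chunks splits
  have htail : pvChunkL m (s.drop r) =
      pvChunkL m ((s.take (s.length - m)).drop r) ++ [s.drop (s.length - m)] := by
    have hudef : (s.take (s.length - m)).drop r = (s.drop r).take (s.length - m - r) := by
      rw [List.drop_take]
    have hdd : (s.drop r).drop (s.length - m - r) = s.drop (s.length - m) := by
      rw [List.drop_drop]; congr 1; omega
    have hsplit : s.drop r = (s.drop r).take (s.length - m - r) ++ (s.drop r).drop (s.length - m - r) :=
      (List.take_append_drop _ _).symm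
    have hdvd : m ∣ ((s.drop r).take (s.length - m - r)).length := by
      have hL : ((s.drop r).take (s.length - m - r)).length = s.length - m - r := by
        simp; omega
      rw [hL]
      have hdm := Nat.div_add_mod s.length m
      have hq1 : 1 ≤ s.length / m := (Nat.one_le_div_iff hm).mpr (le_of_lt hlt)
      obtain ⟨q', hq'⟩ := Nat.exists_eq_add_of_le hq1
      refine ⟨q', ?_⟩
      rw [hq', Nat.mul_add, Nat.mul_one] at hdm
      omega
    conv_lhs => rw [hsplit]
    rw [pvChunkL_append m hm _ _ hdvd, hdd, hudef]
    congr 1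
    rw [pvChunkL_singleton m _ hm]
    · intro h
      have := congrArg List.length h
      simp at this
      omega
    · simp only [List.length_drop]; omega
  by_cases hr0 : r = 0
  · simp only [pvRemForm, hmodA, ← hr]
    rw [hr0] at htail
    simpa [hr0] using htail
  · simp only [pvRemForm, hmodA, ← hr]
    simp only [if_pos hr0]
    rw [List.take_take, min_eq_left hrle]
    simp [htail, hr0]

-- the grand chunk lemma: chunking the reverse from the left = the reversed, element-reversed
-- right-anchored remainder form
theorem pvChunkL_reverse {α : Type} (m : Nat) (hm : 0 < m) (s : List α) :
    pvChunkL m s.reverse = ((pvRemForm m s).map List.reverse).reverse := by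
  induction hn : s.length using Nat.strong_induction_on generalizing s with
  | _ n ih =>
  by_cases hs : s = []
  · subst hs; simp [pvRemForm, pvChunkL_nil]
  by_cases hle : s.length ≤ m
  · -- single chunk
    rw [pvChunkL_singleton m s.reverse hm (by simpa using hs) (by simpa using hle)]
    by_cases hr : s.length % m = 0
    · have hlm : s.length = m := by
        have h1 : 0 < s.length := List.length_pos_of_ne_nil hs
        rcases lt_or_eq_of_le hle with h | h
        · rw [Nat.mod_eq_of_lt h] at hr; omega
        · exact h
      simp [pvRemForm, hr, pvChunkL_singleton m s hm hs (by omega)]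
    · have hlt : s.length < m := by
        rcases lt_or_eq_of_le hle with h | h
        · exact h
        · exact absurd (by simp [h]) hr
      have hmod : s.length % m = s.length := Nat.mod_eq_of_lt hlt
      simp [pvRemForm, hr, hmod, pvChunkL_nil, hs]
  · -- peel the last m elements
    push_neg at hle
    have hbl : (s.drop (s.length - m)).length = m := by simp; omega
    have hbne : s.drop (s.length - m) ≠ [] := by
      intro h; rw [h] at hbl; simp at hbl; omega
    have hrev : s.reverse = (s.drop (s.length - m)).reverse ++ (s.take (s.length - m)).reverse := by
      conv_lhs => rw [← List.take_append_drop (s.length - m) s]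
      simp
    rw [hrev, pvChunkL_append m hm _ _ (by simp [hbl]),
        pvChunkL_singleton m _ hm (by simpa using hbne) (by simp [hbl]),
        ih (s.take (s.length - m)).length (by simp; omega) _ rfl,
        pvRemForm_peel m hm s hle]
    simp

-- join distributes over appending one more piece
theorem pvJoin_append_singleton (sep : List Char) (L : List (List Char)) (y : List Char)
    (h : L ≠ []) :
    PySem.Chars.join sep (L ++ [y]) = PySem.Chars.join sep L ++ sep ++ y := by
  induction L with
  | nil => exact absurd rfl h
  | cons a t ih =>
    cases t with
    | nil => simp [PySem.Chars.join_cons_cons, PySem.Chars.join_singleton]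
    | cons b t' =>
      have ih' := ih (by simp)
      simp only [List.cons_append] at ih' ⊢
      rw [PySem.Chars.join_cons_cons, ih', PySem.Chars.join_cons_cons]
      simp [List.append_assoc]

-- reversing a join: join the element-reversed pieces in reverse order with the reversed separator
theorem pvJoin_reverse (sep : List Char) (L : List (List Char)) :
    (PySem.Chars.join sep L).reverse =
      PySem.Chars.join sep.reverse ((L.map List.reverse).reverse) := by
  induction L with
  | nil => simp [PySem.Chars.join_nil]
  | cons a t ih =>
    cases t with
    | nil => simp [PySem.Chars.join_singleton]
    | cons b t' =>
      have hne : ((b :: t').map List.reverse).reverse ≠ [] := by simp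
      rw [PySem.Chars.join_cons_cons]
      conv_rhs => rw [List.map_cons, List.reverse_cons]
      rw [pvJoin_append_singleton _ _ _ hne, ← ih]
      simp [List.append_assoc]

-- the foldl with prepend IS reverse-of-map
theorem pvFoldl_prepend {α β : Type} (f : List β → α → List β) (L : List α) (init : List β)
    (g : α → β) (hfg : ∀ acc x, f acc x = g x :: acc) :
    L.foldl f init = (L.map g).reverse ++ init := by
  induction L generalizing init with
  | nil => simp
  | cons a t ih => simp [hfg, ih, List.append_assoc]

-- range(a, b, st) with 0 < st and a < b starts with a
theorem pvPyRange_cons (a b st : Int) (hst : 0 < st) (hab : a < b) :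
    PySem.List.pyRange a b st = a :: PySem.List.pyRange (a + st) b st := by
  rw [PySem.List.pyRange_of_pos _ _ hst, PySem.List.pyRange_of_pos _ _ hst]
  rw [if_pos hab]
  by_cases h2 : a + st < b
  · rw [if_pos h2]
    have hN : ((b - a + st - 1) / st).toNat = ((b - (a + st) + st - 1) / st).toNat + 1 := by
      have e : b - a + st - 1 = (b - (a + st) + st - 1) + 1 * st := by ring
      rw [e, Int.add_mul_ediv_right _ _ (by omega)]
      have h0 : 0 ≤ (b - (a + st) + st - 1) / st := Int.ediv_nonneg (by omega) (by omega)
      omega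
    rw [hN, List.range_succ_eq_map]
    simp only [List.map_cons, List.map_map]
    refine congrArg₂ List.cons (by simp) ?_
    apply List.map_congr_left
    intro k _
    simp only [Function.comp_apply]
    push_cast
    ring
  · rw [if_neg h2]
    have hN : ((b - a + st - 1) / st).toNat = 1 := by
      have e : b - a + st - 1 = (b - a - 1) + 1 * st := by ring
      rw [e, Int.add_mul_ediv_right _ _ (by omega)]
      have h0 : (b - a - 1) / st = 0 := Int.ediv_eq_zero_of_lt (by omega) (by omega)
      omega
    rw [hN]
    simp

-- a slice comprehension over range(j, len(s), m) is left-anchored chunking of s.drop j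
theorem pvSlices_eq_chunkL (m : Nat) (hm : 0 < m) (s : List Char) (j : Nat) :
    (PySem.List.pyRange (j : Int) (s.length : Int) (m : Int)).map
      (fun i => PySem.List.slice s (some i) (some (i + (m : Int)))) = pvChunkL m (s.drop j) := by
  induction hn : s.length - j using Nat.strong_induction_on generalizing j with
  | _ n ih =>
  by_cases hj : s.length ≤ j
  · have h1 : PySem.List.pyRange (j : Int) (s.length : Int) (m : Int) = [] := by
      rw [List.eq_nil_iff_forall_not_mem]
      intro x hx
      rw [PySem.List.mem_pyRange_iff_of_pos (by exact_mod_cast hm)] at hx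
      have : (j : Int) ≤ x ∧ x < (s.length : Int) := ⟨hx.1, hx.2.1⟩
      omega
    rw [h1, List.drop_eq_nil_of_le hj, pvChunkL_nil]
    simp
  · push_neg at hj
    rw [pvPyRange_cons _ _ _ (by exact_mod_cast hm) (by exact_mod_cast hj), List.map_cons]
    have hc : (j : Int) + (m : Int) = ((j + m : Nat) : Int) := by push_cast; ring
    rw [PySem.List.slice_natCast_add s j m, hc,
        ih (s.length - (j + m)) (by omega) (j + m) rfl,
        pvChunkL_eq_cons m (s.drop j) (by omega)
          (by intro h; have := congrArg List.length h; simp at this; omega)]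
    congr 1
    rw [List.drop_drop]

-- same, with Int parameters as they occur in the ports
theorem pvSlices_eq_chunkL' (mI : Int) (hmI : 0 < mI) (s : List Char) (jI : Int) (hj : 0 ≤ jI) :
    (PySem.List.pyRange jI (s.length : Int) mI).map
      (fun i => PySem.List.slice s (some i) (some (i + mI))) = pvChunkL mI.toNat (s.drop jI.toNat) := by
  have h1 : jI = ((jI.toNat : Nat) : Int) := by omega
  have h2 : mI = ((mI.toNat : Nat) : Int) := by omega
  rw [h1, h2, pvSlices_eq_chunkL mI.toNat (by omega) s jI.toNat]
  simp only [Int.toNat_natCast]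

-- B's line list is the remainder form
theorem pvLinesB (mI : Int) (hmI : 0 < mI) (s : List Char) :
    ((if PySem.Int.mod (s.length : Int) mI ≠ 0 then
        [PySem.List.slice s none (some (PySem.Int.mod (s.length : Int) mI))] else []) ++
      (PySem.List.pyRange (PySem.Int.mod (s.length : Int) mI) (s.length : Int) mI).map
        (fun i => PySem.List.slice s (some i) (some (i + mI)))) = pvRemForm mI.toNat s := by
  have hmod : PySem.Int.mod (s.length : Int) mI = ((s.length % mI.toNat : Nat) : Int) := by
    simp only [PySem.Int.mod, Int.fmod_eq_emod]
    rw [if_pos (Or.inl (by omega))]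
    have h2 : mI = ((mI.toNat : Nat) : Int) := by omega
    rw [h2]
    push_cast
    simp
  rw [hmod, pvSlices_eq_chunkL' mI hmI s _ (by positivity)]
  have hdrop : ((s.length % mI.toNat : Nat) : Int).toNat = s.length % mI.toNat := Int.toNat_natCast _
  rw [hdrop]
  unfold pvRemForm
  congr 1
  by_cases h : s.length % mI.toNat = 0
  · rw [if_neg (by simp [h]), if_neg (by simp [h])]
  · rw [if_pos (show ((s.length % mI.toNat : Nat) : Int) ≠ 0 by exact_mod_cast h), if_pos h,
        PySem.List.slice_to_natCast]

-- B's grouping of one line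
theorem pvGroup4_eq (p : List Char) :
    pvGroup4 p = PySem.Chars.join [' '] (pvRemForm 4 p) := by
  unfold pvGroup4
  have := pvLinesB 4 (by norm_num) p
  simp only at this ⊢
  rw [this]
  rfl

-- one line of A equals B's grouping of the un-reversed piece
theorem pvLine (p : List Char) :
    (PySem.Chars.join [' '] (pvChunkL 4 p.reverse)).reverse =
      PySem.Chars.join [' '] (pvRemForm 4 p) := by
  rw [pvChunkL_reverse 4 (by norm_num) p, pvJoin_reverse]
  congr 1
  simp [List.map_reverse, List.map_map]

-- the core list-level equivalence
theorem pvCore (m : Nat) (hm : 0 < m) (s : List Char) :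
    ((pvChunkL m s.reverse).map
        (fun l => (PySem.Chars.join [' '] (pvChunkL 4 l)).reverse)).reverse =
      (pvRemForm m s).map (fun p => PySem.Chars.join [' '] (pvRemForm 4 p)) := by
  rw [pvChunkL_reverse m hm s, List.map_reverse, List.reverse_reverse, List.map_map]
  apply List.map_congr_left
  intro p _
  exact pvLine p

-- ===== VERDICT (by name: the statement is the Claim_ definition above) =====
theorem format_binary_string_spec : Claim_equal_format_binary_string := by
  intro num bit_length m _ hpre
  unfold Spec_format_binary_string format_binary_string format_binary_string_alt
  obtain ⟨_, hm⟩ := hpre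
  set s := pyBinChars num bit_length with hs
  simp only []
  congr 1
  -- the A side
  have hA : (PySem.List.pyRange 0 ((s.reverse.length : Nat) : Int) m).map
      (fun i => PySem.List.slice s.reverse (some i) (some (i + m))) =
      pvChunkL m.toNat s.reverse := by
    have := pvSlices_eq_chunkL' m (by omega) s.reverse 0 (by norm_num)
    simpa using this
  rw [hA]
  rw [pvFoldl_prepend _ _ _
      (fun line => (PySem.Chars.join [' ']
        ((PySem.List.pyRange 0 ((line.length : Nat) : Int) 4).map
          (fun i => PySem.List.slice line (some i) (some (i + 4))))).reverse)
      (fun _ _ => rfl)]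
  have hInner : ∀ line : List Char,
      (PySem.List.pyRange 0 ((line.length : Nat) : Int) 4).map
        (fun i => PySem.List.slice line (some i) (some (i + 4))) = pvChunkL 4 line := by
    intro line
    have := pvSlices_eq_chunkL' 4 (by norm_num) line 0 (by norm_num)
    simpa using this
  simp only [hInner, List.append_nil]
  rw [pvCore m.toNat (by omega) s]
  -- the B side
  rw [pvLinesB m (by omega) s]
  congr 1
  apply List.map_congr_left
  intro p _
  exact (pvGroup4_eq p).symm
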